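-- pv_equiv track=rewrite | github.com/TechsNtheCity940/X-seller-8 | modules/data_extractor.py | _extract_products_fallback
-- ===== SOURCE A (Python) =====
-- from typing import Dict, List, Any
--
-- def _extract_products_fallback(text: str) -> List[Dict]:
--     """Extract product mentions using heuristics"""
--     products = []
--
--     # Simple heuristic: Look for capitalized words that might be products
--     # This is a very basic approach and will need refinement
--     lines = text.split('\n')
--     for line in lines:
--         # Skip short lines or lines that are just numbers
--         if len(line.strip()) < 5 or line.strip().isdigit():
--             continue
--
--         # Look for potential product names using capitalization patterns
--         words = line.split()
--         for i, word in enumerate(words):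
--             if word and word[0].isupper() and len(word) > 3:
--                 # Try to capture multi-word product names
--                 product_name = word
--                 j = i + 1
--                 while j < len(words) and (words[j][0].isupper() if words[j] else False):
--                     product_name += " " + words[j]
--                     j += 1
--
--                 # Avoid adding just single words unless they're very likely products
--                 if " " in product_name or len(product_name) > 5:
--                     products.append({
--                         "name": product_name,
--                         "type": "heuristic"
--                     })
--
--     return products
-- ===== SOURCE B (Python) =====
-- from typing import Dict, List
--
--
-- def _extract_products_fallback(text: str) -> List[Dict]:
--     """Extract product mentions using heuristics (run-accumulating single scan)."""
--     products = []
--     for line in text.split('\n'):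
--         stripped = line.strip()
--         if len(stripped) < 5 or stripped.isdigit():
--             continue
--         # One pass over the words, collecting each maximal run of capitalized
--         # words; when a run ends, emit every qualifying suffix of it.
--         run = []
--         for w in line.split() + [""]:  # "" sentinel flushes the last run
--             if w and w[0].isupper():
--                 run.append(w)
--             else:
--                 for p in range(len(run)):
--                     if len(run[p]) > 3:
--                         name = " ".join(run[p:])
--                         if " " in name or len(name) > 5:
--                             products.append({"name": name, "type": "heuristic"})
--                 run = []
--     return products
-- ===== Notes on version B (the rewrite author's own statement) =====
-- stated objective: alternative
-- what changed: Replaces A's per-word inner while-rescan (restarted at every index) with a single run-accumulating pass per line that collects each maximal capitalized run and, when the run ends, emits every qualifying suffix via join of a slice.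
import Mathlib
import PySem

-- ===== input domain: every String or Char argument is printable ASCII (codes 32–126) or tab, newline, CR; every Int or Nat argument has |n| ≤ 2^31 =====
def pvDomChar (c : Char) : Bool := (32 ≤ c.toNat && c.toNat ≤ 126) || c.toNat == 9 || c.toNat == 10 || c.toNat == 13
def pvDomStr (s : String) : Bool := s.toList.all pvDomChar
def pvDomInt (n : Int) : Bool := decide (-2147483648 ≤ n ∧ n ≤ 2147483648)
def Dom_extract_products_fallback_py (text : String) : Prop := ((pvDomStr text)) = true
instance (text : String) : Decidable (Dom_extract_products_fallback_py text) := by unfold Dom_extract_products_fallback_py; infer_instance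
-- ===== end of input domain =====

-- B replaces A's per-index rescanning (an inner while restarted at every word) by one
-- run-accumulating scan per line that emits all qualifying suffixes of each maximal
-- capitalized run when the run ends (objective: alternative decomposition, same result).

-- ===== PORT A =====

-- `words[j][0].isupper() if words[j] else False` / `word and word[0].isupper()`
def pvCap (w : List Char) : Bool :=
  match w with
  | [] => false
  | c :: _ => PySem.Chars.isupper c

-- the dict literal {"name": …, "type": "heuristic"}
def pvEntry (name : List Char) : List (String × String) :=
  [("name", String.ofList name), ("type", "heuristic")]

-- the inner `while j < len(words) and …: product_name += " " + words[j]; j += 1`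
def pvAInner (ws : List (List Char)) (j : Nat) (name : List Char) : List Char :=
  if h : j < ws.length then
    if pvCap ws[j] then pvAInner ws (j + 1) (name ++ ' ' :: ws[j]) else name
  else name
termination_by ws.length - j

-- the outer `for i, word in enumerate(words)` loop, products as accumulator
-- one iteration's body: the `if word and word[0].isupper() and len(word) > 3: …` block
def pvAStep (ws : List (List Char)) (i : Nat) (w : List Char)
    (acc : List (List (String × String))) : List (List (String × String)) :=
  match w with
  | [] => acc
  | c :: _ =>
    if PySem.Chars.isupper c && decide (3 < w.length) then
      let name := pvAInner ws (i + 1) w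
      if PySem.Chars.isIn [' '] name || decide (5 < name.length) then acc ++ [pvEntry name]
      else acc
    else acc

def pvALoop (ws : List (List Char)) (i : Nat) (acc : List (List (String × String))) :
    List (List (String × String)) :=
  if h : i < ws.length then
    pvALoop ws (i + 1) (pvAStep ws i ws[i] acc)
  else acc
termination_by ws.length - i

def extract_products_fallback_py (text : String) : List (List (String × String)) :=
  (PySem.Chars.splitOn text.toList ['\n']).foldl
    (fun acc line =>
      let s := PySem.Chars.strip line
      if s.length < 5 || PySem.Chars.strIsdigit s then acc
      else pvALoop (PySem.Chars.split₀ line) 0 acc) []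

-- ===== PORT B =====

-- flush: `for p in range(len(run)): if len(run[p]) > 3: name = " ".join(run[p:]) …`
def pvBEmit (run : List (List Char)) : List (List (String × String)) :=
  match run with
  | [] => []
  | w :: rest =>
    (if decide (3 < w.length) then
       let name := PySem.Chars.join [' '] (w :: rest)
       if PySem.Chars.isIn [' '] name || decide (5 < name.length) then [pvEntry name] else []
     else []) ++ pvBEmit rest

-- one pass over `words + [""]` with the (run, products) state
def pvBLine (ws : List (List Char)) (acc : List (List (String × String))) :
    List (List (String × String)) :=
  ((ws ++ [([] : List Char)]).foldl
    (fun (st : List (List Char) × List (List (String × String))) w =>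
      if pvCap w then (st.1 ++ [w], st.2) else ([], st.2 ++ pvBEmit st.1))
    ([], acc)).2

def extract_products_fallback_py_alt (text : String) : List (List (String × String)) :=
  (PySem.Chars.splitOn text.toList ['\n']).foldl
    (fun acc line =>
      let s := PySem.Chars.strip line
      if s.length < 5 || PySem.Chars.strIsdigit s then acc
      else pvBLine (PySem.Chars.split₀ line) acc) []

-- ===== PRECONDITION & SPEC =====
def Spec_extract_products_fallback_py (text : String) (out : List (List (String × String))) : Prop := out = extract_products_fallback_py_alt text
instance (text : String) (out : List (List (String × String))) : Decidable (Spec_extract_products_fallback_py text out) := by unfold Spec_extract_products_fallback_py; infer_instance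

-- ===== CLAIM (what is proved, stated in full; the proofs are below) =====
def Claim_equal_extract_products_fallback_py : Prop := ∀ (text : String), Dom_extract_products_fallback_py text → Spec_extract_products_fallback_py text (extract_products_fallback_py text)

-- ===== LEMMAS AND PROOFS =====

-- reference per-line function both ports are reduced to
def pvSpecLine : List (List Char) → List (List (String × String))
  | [] => []
  | w :: rest =>
    (match w with
     | [] => []
     | c :: _ =>
       if PySem.Chars.isupper c && decide (3 < w.length) then
         let name := w ++ ((rest.takeWhile pvCap).map (fun v => ' ' :: v)).flatten
         if PySem.Chars.isIn [' '] name || decide (5 < name.length) then [pvEntry name] else []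
       else []) ++ pvSpecLine rest

theorem pvAInner_eq (ws : List (List Char)) (j : Nat) (name : List Char) :
    pvAInner ws j name = name ++ (((ws.drop j).takeWhile pvCap).map (fun v => ' ' :: v)).flatten := by
  fun_induction pvAInner ws j name with
  | case1 j name h hc ih =>
    rw [ih, List.drop_eq_getElem_cons h, List.takeWhile_cons_of_pos hc]
    simp
  | case2 j name h hc =>
    rw [List.drop_eq_getElem_cons h, List.takeWhile_cons_of_neg (by simp [hc])]
    simp
  | case3 j name h =>
    rw [List.drop_eq_nil_of_le (by omega)]
    simp

theorem pvALoop_eq (ws : List (List Char)) (i : Nat) (acc : List (List (String × String))) :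
    pvALoop ws i acc = acc ++ pvSpecLine (ws.drop i) := by
  fun_induction pvALoop ws i acc with
  | case1 i acc h ih =>
    rw [ih, List.drop_eq_getElem_cons h]
    cases hw : ws[i] with
    | nil => simp [pvSpecLine, pvAStep]
    | cons c rest =>
      simp only [pvSpecLine, pvAStep, pvAInner_eq]
      split_ifs with h1 h2 <;> simp_all
  | case2 i acc h =>
    rw [List.drop_eq_nil_of_le (by omega)]
    simp [pvSpecLine]

theorem pv_takeWhile_append_of_all {p : List Char → Bool} (r l : List (List Char))
    (hr : ∀ w ∈ r, p w = true) : (r ++ l).takeWhile p = r ++ l.takeWhile p := by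
  induction r with
  | nil => simp
  | cons w r ih =>
    rw [List.cons_append, List.takeWhile_cons_of_pos (hr w (by simp)),
      ih (fun x hx => hr x (by simp [hx]))]
    simp

theorem pv_join_space (w : List Char) (l : List (List Char)) :
    PySem.Chars.join [' '] (w :: l) = w ++ (l.map (fun v => ' ' :: v)).flatten := by
  induction l generalizing w with
  | nil => simp [PySem.Chars.join_singleton]
  | cons v l ih => rw [PySem.Chars.join_cons_cons, ih]; simp

-- a flushed all-capitalized run followed by a non-run tail
theorem pvSpecLine_run (run rest : List (List Char)) (hr : ∀ w ∈ run, pvCap w = true)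
    (ht : rest.takeWhile pvCap = []) :
    pvSpecLine (run ++ rest) = pvBEmit run ++ pvSpecLine rest := by
  induction run with
  | nil => simp [pvBEmit]
  | cons w r ih =>
    have hw : pvCap w = true := hr w (by simp)
    have hr' : ∀ x ∈ r, pvCap x = true := fun x hx => hr x (by simp [hx])
    cases w with
    | nil => simp [pvCap] at hw
    | cons c cs =>
      have hcap : PySem.Chars.isupper c = true := hw
      simp only [List.cons_append, pvSpecLine, pvBEmit,
        pv_takeWhile_append_of_all r rest hr', ht, List.append_nil, hcap,
        Bool.true_and, pv_join_space, ih hr']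
      split_ifs <;> simp

theorem pvBLine_inv (l run : List (List Char)) (acc : List (List (String × String)))
    (hr : ∀ w ∈ run, pvCap w = true) :
    ((l ++ [([] : List Char)]).foldl
      (fun (st : List (List Char) × List (List (String × String))) w =>
        if pvCap w then (st.1 ++ [w], st.2) else ([], st.2 ++ pvBEmit st.1))
      (run, acc)).2 = acc ++ pvSpecLine (run ++ l) := by
  induction l generalizing run acc with
  | nil =>
    simp only [List.nil_append, List.foldl_cons, List.foldl_nil]
    rw [if_neg (by simp [pvCap])]
    have hsr := pvSpecLine_run run [] hr (by simp)
    simp only [List.append_nil] at hsr ⊢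
    simp [hsr, pvSpecLine]
  | cons w l ih =>
    simp only [List.cons_append, List.foldl_cons]
    by_cases hw : pvCap w = true
    · rw [if_pos hw, ih (run ++ [w]) acc (by
        intro x hx; rcases List.mem_append.1 hx with h | h
        · exact hr x h
        · simp at h; subst h; exact hw)]
      simp
    · rw [if_neg hw, ih [] (acc ++ pvBEmit run) (by simp)]
      have h1 : pvSpecLine (run ++ w :: l) = pvBEmit run ++ pvSpecLine (w :: l) :=
        pvSpecLine_run run (w :: l) hr (List.takeWhile_cons_of_neg (by simpa using hw))
      have h2 : pvSpecLine (w :: l) = pvSpecLine l := by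
        cases w with
        | nil => simp [pvSpecLine]
        | cons c cs =>
          have : PySem.Chars.isupper c = false := by simpa [pvCap] using hw
          simp [pvSpecLine, this]
      simp [h1, h2]

theorem pvBLine_eq (ws : List (List Char)) (acc : List (List (String × String))) :
    pvBLine ws acc = acc ++ pvSpecLine ws := by
  have h := pvBLine_inv ws [] acc (by simp)
  simp only [List.nil_append] at h
  exact h

theorem pvLines_eq (lines : List (List Char)) (acc : List (List (String × String))) :
    lines.foldl
      (fun acc line =>
        let s := PySem.Chars.strip line
        if s.length < 5 || PySem.Chars.strIsdigit s then acc
        else pvALoop (PySem.Chars.split₀ line) 0 acc) acc =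
    lines.foldl
      (fun acc line =>
        let s := PySem.Chars.strip line
        if s.length < 5 || PySem.Chars.strIsdigit s then acc
        else pvBLine (PySem.Chars.split₀ line) acc) acc := by
  induction lines generalizing acc with
  | nil => rfl
  | cons line rest ih =>
    simp only [List.foldl_cons]
    rw [ih]
    congr 1
    by_cases hg : ((PySem.Chars.strip line).length < 5 || PySem.Chars.strIsdigit (PySem.Chars.strip line)) = true
    · simp only [hg, if_pos]
    · simp only [hg, if_neg, Bool.false_eq_true, not_false_iff]
      rw [pvBLine_eq, pvALoop_eq, List.drop_zero]

-- ===== VERDICT (by name: the statement is the Claim_ definition above) =====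
theorem extract_products_fallback_py_spec : Claim_equal_extract_products_fallback_py := by
  intro text _
  unfold Spec_extract_products_fallback_py extract_products_fallback_py extract_products_fallback_py_alt
  exact pvLines_eq _ []
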